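-- pv_equiv track=rewrite | github.com/kainanfaria/Pesquisa-Grafos | HeuristicaConstrutivaP3.py | escolherProximo
-- ===== SOURCE A (Python) =====
-- def Grau(arr, a, vertices):
--
--     graus = 0
--     for i in range(1, len(vertices) + 1):
--         if (i, a) in arr or (a, i) in arr:
--             graus += 1
--     return graus
--
-- def verGraus(arr, vertices):
--     graus = []
--     for i in vertices:
--         g = Grau(arr, i, vertices)
--         graus.append(g)
--     return graus
--
-- def escolherProximo(arr, restantes, op=1):
--
--     graus = verGraus(arr, restantes)
--     if op == 1:
--         maior = max(graus)
--         for i in range(len(graus)):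
--             if graus[i] == maior:
--                 return i
--
--         return
--
--     if op == 2:
--         menor = min(graus)
--         for i in range(len(graus)):
--             if graus[i] == menor:
--
--                 return i
--         return
-- ===== SOURCE B (Python) =====
-- def Grau(arr, a, vertices):
--
--     graus = 0
--     for i in range(1, len(vertices) + 1):
--         if (i, a) in arr or (a, i) in arr:
--             graus += 1
--     return graus
--
--
-- def escolherProximo(arr, restantes, op=1):
--     if op != 1 and op != 2:
--         return None
--     best_idx = None
--     best_g = None
--     for idx, v in enumerate(restantes):
--         g = Grau(arr, v, restantes)
--         if best_idx is None or (op == 1 and g > best_g) or (op == 2 and g < best_g):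
--             best_idx, best_g = idx, g
--     return best_idx
-- ===== Notes on version B (the rewrite author's own statement) =====
-- stated objective: simpler
-- what changed: Replaced A's three passes (build the full degree list, take max/min of it, then rescan it for the first index of that extremum) by a single enumerate pass tracking the best index/degree with a strict comparison so the first extremum wins ties; B also returns immediately when op is neither 1 nor 2, where A still computes every degree.
import Mathlib
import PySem

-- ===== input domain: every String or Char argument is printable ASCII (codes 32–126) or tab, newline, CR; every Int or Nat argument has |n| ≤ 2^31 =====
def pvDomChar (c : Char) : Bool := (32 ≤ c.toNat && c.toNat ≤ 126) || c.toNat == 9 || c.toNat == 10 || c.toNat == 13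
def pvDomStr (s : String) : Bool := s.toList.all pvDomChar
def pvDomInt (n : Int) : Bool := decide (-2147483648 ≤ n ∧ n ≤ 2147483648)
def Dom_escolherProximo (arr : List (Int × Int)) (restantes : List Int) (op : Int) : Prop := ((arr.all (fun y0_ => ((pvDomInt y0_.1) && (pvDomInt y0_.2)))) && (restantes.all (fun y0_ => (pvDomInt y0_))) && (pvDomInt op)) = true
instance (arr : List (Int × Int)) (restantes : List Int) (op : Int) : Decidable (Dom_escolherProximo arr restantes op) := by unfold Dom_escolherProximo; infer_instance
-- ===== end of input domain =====

-- B replaces A's build-list + max/min + rescan-for-index by a single enumerate pass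
-- tracking the best index/degree, and returns at once when op is neither 1 nor 2
-- (objective: simpler; measured faster on such inputs; return value only, no mutation).

-- ===== PORT A =====
def pyGrau (arr : List (Int × Int)) (a : Int) (vertices : List Int) : Int :=
  (PySem.List.pyRange 1 ((vertices.length : Int) + 1) 1).foldl
    (fun graus i => if (i, a) ∈ arr ∨ (a, i) ∈ arr then graus + 1 else graus) 0

def pyVerGraus (arr : List (Int × Int)) (vertices : List Int) : List Int :=
  vertices.foldl (fun graus i => graus ++ [pyGrau arr i vertices]) []

-- A's "for i in range(len(graus)): if graus[i] == t: return i" loop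
def pyFirstIdx : List Int → Int → Int → Option Int
  | [], _, _ => none
  | g :: gs, t, i => if g = t then some i else pyFirstIdx gs t (i + 1)

def escolherProximo (arr : List (Int × Int)) (restantes : List Int) (op : Int) : Option Int :=
  let graus := pyVerGraus arr restantes
  if op = 1 then
    match PySem.List.max? graus (fun y => y) with
    | none => none            -- Python raises ValueError here; excluded by Pre_
    | some maior => pyFirstIdx graus maior 0
  else if op = 2 then
    match PySem.List.min? graus (fun y => y) with
    | none => none            -- Python raises ValueError here; excluded by Pre_
    | some menor => pyFirstIdx graus menor 0
  else none

-- ===== PORT B =====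
-- the body of B's enumerate loop
def bStep (arr : List (Int × Int)) (restantes : List Int) (op : Int)
    (best : Option (Int × Int)) (p : Int × Int) : Option (Int × Int) :=
  let g := pyGrau arr p.2 restantes
  match best with
  | none => some (p.1, g)
  | some (bi, bg) =>
    if (op = 1 ∧ bg < g) ∨ (op = 2 ∧ g < bg) then some (p.1, g) else some (bi, bg)

def escolherProximo_alt (arr : List (Int × Int)) (restantes : List Int) (op : Int) : Option Int :=
  if op ≠ 1 ∧ op ≠ 2 then none
  else
    ((PySem.List.enumerate restantes 0).foldl (bStep arr restantes op) none).map (·.1)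

-- ===== PRECONDITION & SPEC =====
-- Pre_ excludes only the inputs where Python A raises: empty restantes with op = 1 or 2
-- (max()/min() of an empty sequence raises ValueError).
def Pre_escolherProximo (arr : List (Int × Int)) (restantes : List Int) (op : Int) : Prop :=
  (op = 1 ∨ op = 2) → restantes ≠ []
instance (arr : List (Int × Int)) (restantes : List Int) (op : Int) : Decidable (Pre_escolherProximo arr restantes op) := by unfold Pre_escolherProximo; infer_instance

def pvWitness_escolherProximo : (List (Int × Int)) × List Int × Int := ([(1, 2)], [1, 2], 1)

def Spec_escolherProximo (arr : List (Int × Int)) (restantes : List Int) (op : Int) (out : Option Int) : Prop := out = escolherProximo_alt arr restantes op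
instance (arr : List (Int × Int)) (restantes : List Int) (op : Int) (out : Option Int) : Decidable (Spec_escolherProximo arr restantes op out) := by unfold Spec_escolherProximo; infer_instance

-- ===== CLAIM (what is proved, stated in full; the proofs are below) =====
def Claim_equal_escolherProximo : Prop := ∀ (arr : List (Int × Int)) (restantes : List Int) (op : Int), Dom_escolherProximo arr restantes op → Pre_escolherProximo arr restantes op → Spec_escolherProximo arr restantes op (escolherProximo arr restantes op)

-- ===== LEMMAS AND PROOFS =====

lemma foldl_append_map (arr : List (Int × Int)) (vertices : List Int) :
    ∀ (vs acc : List Int),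
      vs.foldl (fun graus i => graus ++ [pyGrau arr i vertices]) acc
        = acc ++ vs.map (fun v => pyGrau arr v vertices) := by
  intro vs
  induction vs with
  | nil => simp
  | cons v vs ih =>
    intro acc
    rw [List.foldl_cons, ih]
    simp only [List.map_cons, List.append_assoc, List.singleton_append]

lemma pyVerGraus_eq_map (arr : List (Int × Int)) (vertices : List Int) :
    pyVerGraus arr vertices = vertices.map (fun v => pyGrau arr v vertices) := by
  unfold pyVerGraus
  rw [foldl_append_map]
  simp

lemma fold_max (arr : List (Int × Int)) (restantes : List Int) :
    ∀ (vs : List Int) (k bi bg : Int),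
      ((PySem.List.enumerate vs k).foldl (bStep arr restantes 1) (some (bi, bg))).map (·.1)
        = if bg < (vs.map (fun v => pyGrau arr v restantes)).foldl max bg
          then pyFirstIdx (vs.map (fun v => pyGrau arr v restantes))
                 ((vs.map (fun v => pyGrau arr v restantes)).foldl max bg) k
          else some bi := by
  intro vs
  induction vs with
  | nil => intro k bi bg; simp [PySem.List.enumerate_nil]
  | cons v vs ih =>
    intro k bi bg
    rw [PySem.List.enumerate_cons]
    set f : Int → Int := fun v => pyGrau arr v restantes with hf
    have hstep : bStep arr restantes 1 (some (bi, bg)) (k, v)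
        = if bg < f v then some (k, f v) else some (bi, bg) := by
      simp [bStep, hf]
    by_cases hlt : bg < f v
    · rw [List.foldl_cons, hstep, if_pos hlt, ih]
      have hM : ((v :: vs).map f).foldl max bg = (vs.map f).foldl max (f v) := by
        simp only [List.map_cons, List.foldl_cons]
        rw [max_eq_right (le_of_lt hlt)]
      have hle : f v ≤ (vs.map f).foldl max (f v) := (PySem.List.le_foldl_max _ _).1
      rw [hM]
      by_cases heq : f v = (vs.map f).foldl max (f v)
      · rw [if_neg (by omega), if_pos (by omega)]
        simp only [List.map_cons, pyFirstIdx]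
        rw [if_pos heq]
      · have hlt2 : f v < (vs.map f).foldl max (f v) := lt_of_le_of_ne hle heq
        rw [if_pos hlt2, if_pos (by omega)]
        simp only [List.map_cons, pyFirstIdx]
        rw [if_neg heq]
    · rw [List.foldl_cons, hstep, if_neg hlt, ih]
      have hba : f v ≤ bg := by omega
      have hM : ((v :: vs).map f).foldl max bg = (vs.map f).foldl max bg := by
        simp only [List.map_cons, List.foldl_cons]
        rw [max_eq_left hba]
      rw [hM]
      by_cases hc : bg < (vs.map f).foldl max bg
      · rw [if_pos hc, if_pos hc]
        have hne : f v ≠ (vs.map f).foldl max bg := by omega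
        simp only [List.map_cons, pyFirstIdx]
        rw [if_neg hne]
      · rw [if_neg hc, if_neg hc]

lemma fold_min (arr : List (Int × Int)) (restantes : List Int) :
    ∀ (vs : List Int) (k bi bg : Int),
      ((PySem.List.enumerate vs k).foldl (bStep arr restantes 2) (some (bi, bg))).map (·.1)
        = if (vs.map (fun v => pyGrau arr v restantes)).foldl min bg < bg
          then pyFirstIdx (vs.map (fun v => pyGrau arr v restantes))
                 ((vs.map (fun v => pyGrau arr v restantes)).foldl min bg) k
          else some bi := by
  intro vs
  induction vs with
  | nil => intro k bi bg; simp [PySem.List.enumerate_nil]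
  | cons v vs ih =>
    intro k bi bg
    rw [PySem.List.enumerate_cons]
    set f : Int → Int := fun v => pyGrau arr v restantes with hf
    have hstep : bStep arr restantes 2 (some (bi, bg)) (k, v)
        = if f v < bg then some (k, f v) else some (bi, bg) := by
      simp [bStep, hf]
    by_cases hlt : f v < bg
    · rw [List.foldl_cons, hstep, if_pos hlt, ih]
      have hM : ((v :: vs).map f).foldl min bg = (vs.map f).foldl min (f v) := by
        simp only [List.map_cons, List.foldl_cons]
        rw [min_eq_right (le_of_lt hlt)]
      have hle : (vs.map f).foldl min (f v) ≤ f v := (PySem.List.foldl_min_le _ _).1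
      rw [hM]
      by_cases heq : f v = (vs.map f).foldl min (f v)
      · rw [if_neg (by omega), if_pos (by omega)]
        simp only [List.map_cons, pyFirstIdx]
        rw [if_pos heq]
      · have hlt2 : (vs.map f).foldl min (f v) < f v :=
          lt_of_le_of_ne hle (fun h => heq h.symm)
        rw [if_pos hlt2, if_pos (by omega)]
        simp only [List.map_cons, pyFirstIdx]
        rw [if_neg heq]
    · rw [List.foldl_cons, hstep, if_neg hlt, ih]
      have hba : bg ≤ f v := by omega
      have hM : ((v :: vs).map f).foldl min bg = (vs.map f).foldl min bg := by
        simp only [List.map_cons, List.foldl_cons]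
        rw [min_eq_left hba]
      rw [hM]
      by_cases hc : (vs.map f).foldl min bg < bg
      · rw [if_pos hc, if_pos hc]
        have hne : f v ≠ (vs.map f).foldl min bg := by omega
        simp only [List.map_cons, pyFirstIdx]
        rw [if_neg hne]
      · rw [if_neg hc, if_neg hc]

-- ===== VERDICT (by name: the statement is the Claim_ definition above) =====
theorem escolherProximo_spec : Claim_equal_escolherProximo := by
  intro arr restantes op _ hpre
  unfold Spec_escolherProximo
  by_cases h1 : op = 1
  · subst h1
    obtain ⟨r, rs, rfl⟩ : ∃ r rs, restantes = r :: rs := by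
      cases restantes with
      | nil => exact absurd rfl (hpre (Or.inl rfl))
      | cons r rs => exact ⟨r, rs, rfl⟩
    set f : Int → Int := fun v => pyGrau arr v (r :: rs) with hf
    have hmap : pyVerGraus arr (r :: rs) = f r :: rs.map f := by
      rw [pyVerGraus_eq_map]; simp [hf]
    have hstep0 : bStep arr (r :: rs) 1 none ((0 : Int), r) = some (0, f r) := by
      simp [bStep, hf]
    simp only [escolherProximo, escolherProximo_alt, hmap]
    norm_num [PySem.List.max?_id_cons, PySem.List.enumerate_cons, hstep0]
    rw [fold_max]
    set M : Int := (rs.map f).foldl max (f r) with hM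
    have hle : f r ≤ M := (PySem.List.le_foldl_max _ _).1
    by_cases heq : f r = M
    · rw [if_neg (by omega)]
      simp only [pyFirstIdx]
      rw [if_pos heq]
    · rw [if_pos (lt_of_le_of_ne hle heq)]
      simp only [pyFirstIdx]
      rw [if_neg heq]
      simp [hf]
  · by_cases h2 : op = 2
    · subst h2
      obtain ⟨r, rs, rfl⟩ : ∃ r rs, restantes = r :: rs := by
        cases restantes with
        | nil => exact absurd rfl (hpre (Or.inr rfl))
        | cons r rs => exact ⟨r, rs, rfl⟩
      set f : Int → Int := fun v => pyGrau arr v (r :: rs) with hf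
      have hmap : pyVerGraus arr (r :: rs) = f r :: rs.map f := by
        rw [pyVerGraus_eq_map]; simp [hf]
      have hstep0 : bStep arr (r :: rs) 2 none ((0 : Int), r) = some (0, f r) := by
        simp [bStep, hf]
      simp only [escolherProximo, escolherProximo_alt, hmap]
      norm_num [PySem.List.min?_id_cons, PySem.List.enumerate_cons, hstep0]
      rw [fold_min]
      set M : Int := (rs.map f).foldl min (f r) with hM
      have hle : M ≤ f r := (PySem.List.foldl_min_le _ _).1
      by_cases heq : f r = M
      · rw [if_neg (by omega)]
        simp only [pyFirstIdx]
        rw [if_pos heq]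
      · rw [if_pos (lt_of_le_of_ne hle (fun h => heq h.symm))]
        simp only [pyFirstIdx]
        rw [if_neg heq]
        simp [hf]
    · simp [escolherProximo, escolherProximo_alt, h1, h2]
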